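-- pv_equiv track=rewrite | github.com/yzhao062/anywhere-agents | scripts/guard.py | extract_gh_subcommand
-- ===== SOURCE A (Python) =====
-- _GH_VALUE_FLAGS = {"-R", "--repo", "--hostname"}
--
-- def extract_gh_subcommand(parts):
--     """Skip gh flags (before and after group), return (group, action)."""
--     i = 1  # skip "gh"
--     # Skip flags before group
--     while i < len(parts):
--         if parts[i] in _GH_VALUE_FLAGS and i + 1 < len(parts):
--             i += 2
--         elif parts[i].startswith("-"):
--             i += 1
--         else:
--             break
--     group = parts[i] if i < len(parts) else ""
--     i += 1
--     # Skip flags between group and action (inherited flags like -R can appear here)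
--     while i < len(parts):
--         if parts[i] in _GH_VALUE_FLAGS and i + 1 < len(parts):
--             i += 2
--         elif parts[i].startswith("-"):
--             i += 1
--         else:
--             break
--     action = parts[i] if i < len(parts) else ""
--     return group, action
-- ===== SOURCE B (Python) =====
-- _GH_VALUE_FLAGS = {"-R", "--repo", "--hostname"}
--
-- def extract_gh_subcommand(parts):
--     """Skip gh flags (before and after group), return (group, action)."""
--     rest = parts[1:]  # skip "gh"
--     found = []
--     while rest and len(found) < 2:
--         tok = rest[0]
--         if tok in _GH_VALUE_FLAGS and len(rest) > 1:
--             rest = rest[2:]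
--         elif tok.startswith("-"):
--             rest = rest[1:]
--         else:
--             found.append(tok)
--             rest = rest[1:]
--     found += ["", ""]
--     return found[0], found[1]
-- ===== Notes on version B (the rewrite author's own statement) =====
-- stated objective: simpler
-- what changed: Replaces A's two identical index-based flag-skipping phase loops (plus per-phase bounds-checked indexing) with one suffix-consuming loop that collects up to two positional tokens into a list and pads it with empty strings.
import Mathlib
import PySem

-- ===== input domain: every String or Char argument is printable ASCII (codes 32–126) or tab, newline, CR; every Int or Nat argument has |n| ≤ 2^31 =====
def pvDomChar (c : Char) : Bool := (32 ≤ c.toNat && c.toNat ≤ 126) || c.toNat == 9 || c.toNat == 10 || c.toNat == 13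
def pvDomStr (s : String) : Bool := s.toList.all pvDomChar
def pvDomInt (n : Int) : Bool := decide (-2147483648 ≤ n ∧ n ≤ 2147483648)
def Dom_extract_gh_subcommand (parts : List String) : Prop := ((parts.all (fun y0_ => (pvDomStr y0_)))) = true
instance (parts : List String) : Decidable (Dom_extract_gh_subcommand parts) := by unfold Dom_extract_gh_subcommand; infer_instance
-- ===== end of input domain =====

-- B replaces A's two identical index-based flag-skipping phase loops with one
-- suffix-consuming loop collecting up to two positional tokens (objective: simpler).

-- ===== PORT A =====
-- the two identical while-loops of A, as one index-advancing helper
def ghSkipFlags (parts : List String) (i : Nat) : Nat :=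
  if h : i < parts.length then
    if parts[i] ∈ (["-R", "--repo", "--hostname"] : List String) ∧ i + 1 < parts.length then
      ghSkipFlags parts (i + 2)
    else if (parts[i]).startsWith "-" then
      ghSkipFlags parts (i + 1)
    else i
  else i
termination_by parts.length - i

def extract_gh_subcommand (parts : List String) : String × String :=
  let i1 := ghSkipFlags parts 1
  let group := if h : i1 < parts.length then parts[i1] else ""
  let i2 := ghSkipFlags parts (i1 + 1)
  let action := if h : i2 < parts.length then parts[i2] else ""
  (group, action)

-- ===== PORT B =====
-- B's single loop: consume the suffix, collect up to two positional tokens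
def ghCollect (rest : List String) (found : List String) : List String :=
  match rest with
  | [] => found
  | tok :: rs =>
    if found.length < 2 then
      if tok ∈ (["-R", "--repo", "--hostname"] : List String) ∧ rs ≠ [] then
        ghCollect rs.tail found
      else if tok.startsWith "-" then
        ghCollect rs found
      else
        ghCollect rs (found ++ [tok])
    else found
termination_by rest.length
decreasing_by all_goals simp [List.length_tail]

def extract_gh_subcommand_alt (parts : List String) : String × String :=
  let found := ghCollect (parts.drop 1) [] ++ ["", ""]
  (found.getD 0 "", found.getD 1 "")

-- ===== PRECONDITION & SPEC =====
def Spec_extract_gh_subcommand (parts : List String) (out : String × String) : Prop := out = extract_gh_subcommand_alt parts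
instance (parts : List String) (out : String × String) : Decidable (Spec_extract_gh_subcommand parts out) := by unfold Spec_extract_gh_subcommand; infer_instance

-- ===== CLAIM (what is proved, stated in full; the proofs are below) =====
def Claim_equal_extract_gh_subcommand : Prop := ∀ (parts : List String), Dom_extract_gh_subcommand parts → Spec_extract_gh_subcommand parts (extract_gh_subcommand parts)

-- ===== LEMMAS AND PROOFS =====

lemma ghCollect_full (rest found : List String) (h : ¬ found.length < 2) :
    ghCollect rest found = found := by
  cases rest with
  | nil => simp [ghCollect]
  | cons tok rs => simp [ghCollect, h]

-- one collecting pass from suffix i = one phase loop of A plus picking up parts[j]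
lemma ghCollect_skip (parts : List String) (i : Nat) (found : List String)
    (hf : found.length < 2) :
    ghCollect (parts.drop i) found =
      (if h : ghSkipFlags parts i < parts.length then
        ghCollect (parts.drop (ghSkipFlags parts i + 1))
          (found ++ [parts[ghSkipFlags parts i]])
      else found) := by
  by_cases hi : i < parts.length
  · rw [List.drop_eq_getElem_cons hi]
    by_cases hv : parts[i] ∈ (["-R", "--repo", "--hostname"] : List String) ∧ i + 1 < parts.length
    · have hskip : ghSkipFlags parts i = ghSkipFlags parts (i + 2) := by
        rw [ghSkipFlags, dif_pos hi, if_pos hv]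
      have htail : (parts.drop (i + 1)).tail = parts.drop (i + 2) := by
        simp [List.tail_drop]
      have hne : parts.drop (i + 1) ≠ [] := by
        simp only [ne_eq, List.drop_eq_nil_iff]; omega
      rw [ghCollect, if_pos hf, if_pos ⟨hv.1, hne⟩, htail, hskip]
      exact ghCollect_skip parts (i + 2) found hf
    · have hv' : ¬ (parts[i] ∈ (["-R", "--repo", "--hostname"] : List String) ∧
          parts.drop (i + 1) ≠ []) := by
        intro hc
        rcases Nat.lt_or_ge (i + 1) parts.length with h1 | h1
        · exact hv ⟨hc.1, h1⟩
        · exact hc.2 (by rw [List.drop_eq_nil_iff]; omega)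
      by_cases hd : (parts[i]).startsWith "-"
      · have hskip : ghSkipFlags parts i = ghSkipFlags parts (i + 1) := by
          rw [ghSkipFlags, dif_pos hi, if_neg hv, if_pos hd]
        rw [ghCollect, if_pos hf, if_neg hv', if_pos hd, hskip]
        exact ghCollect_skip parts (i + 1) found hf
      · have hskip : ghSkipFlags parts i = i := by
          rw [ghSkipFlags, dif_pos hi, if_neg hv, if_neg hd]
        rw [ghCollect, if_pos hf, if_neg hv', if_neg hd, hskip, dif_pos hi]
  · have hskip : ghSkipFlags parts i = i := by
      rw [ghSkipFlags, dif_neg hi]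
    rw [List.drop_eq_nil_of_le (by omega)]
    simp [ghCollect, hskip, hi]
termination_by parts.length - i
decreasing_by all_goals omega

-- ===== VERDICT (by name: the statement is the Claim_ definition above) =====
theorem extract_gh_subcommand_spec : Claim_equal_extract_gh_subcommand := by
  intro parts _
  unfold Spec_extract_gh_subcommand extract_gh_subcommand extract_gh_subcommand_alt
  rw [ghCollect_skip parts 1 [] (by simp)]
  by_cases h1 : ghSkipFlags parts 1 < parts.length
  · simp only [h1, dif_pos, List.nil_append]
    rw [ghCollect_skip parts (ghSkipFlags parts 1 + 1) _ (by simp)]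
    by_cases h2 : ghSkipFlags parts (ghSkipFlags parts 1 + 1) < parts.length
    · simp only [h2, dif_pos]
      rw [ghCollect_full _ _ (by simp)]
      simp
    · simp [h2]
  · simp only [dif_neg h1]
    have h2 : ¬ ghSkipFlags parts (ghSkipFlags parts 1 + 1) < parts.length := by
      have : ghSkipFlags parts (ghSkipFlags parts 1 + 1) = ghSkipFlags parts 1 + 1 := by
        rw [ghSkipFlags]; simp; omega
      omega
    simp [h2]
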